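-- pv_equiv track=rewrite | github.com/digitalservice4germany/steuerlotse | webapp/app/forms/steps/steuerlotse_step.py | _delete_dependent_data
-- ===== SOURCE A (Python) =====
-- def _delete_dependent_data(stored_data: dict, pre_fixes: list = None, post_fixes: list = None):
--     """This method filters the stored data. It deletes all the elements where the key includes the
--     data_field_identifier. """
--     filtered_data = stored_data
--     if pre_fixes:
--         filtered_data = dict(filter(lambda elem: not any([elem[0].startswith(data_field_prefix)
--                                                           for data_field_prefix in pre_fixes]),
--                                     filtered_data.items()))
--     if post_fixes:
--         filtered_data = dict(filter(lambda elem: not any([elem[0].endswith(data_field_postfix)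
--                                                           for data_field_postfix in post_fixes]),
--                                     filtered_data.items()))
--     return filtered_data
-- ===== SOURCE B (Python) =====
-- def _delete_dependent_data(stored_data: dict, pre_fixes: list = None, post_fixes: list = None):
--     """Inverted traversal: for each prefix/suffix collect the matching keys into a
--     'doomed' set, then rebuild the dict once, skipping doomed keys."""
--     doomed = set()
--     for prefix in (pre_fixes or []):
--         for key in stored_data:
--             if key.startswith(prefix):
--                 doomed.add(key)
--     for suffix in (post_fixes or []):
--         for key in stored_data:
--             if key.endswith(suffix):
--                 doomed.add(key)
--     return {k: v for k, v in stored_data.items() if k not in doomed}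
-- ===== Notes on version B (the rewrite author's own statement) =====
-- stated objective: alternative
-- what changed: Inverts the loop nesting: instead of A's two key-major filter passes each scanning all fixes per key, B iterates fixes in the outer loop collecting the matching keys into a 'doomed' set, then rebuilds the dict in one final pass skipping doomed keys.
import Mathlib
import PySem

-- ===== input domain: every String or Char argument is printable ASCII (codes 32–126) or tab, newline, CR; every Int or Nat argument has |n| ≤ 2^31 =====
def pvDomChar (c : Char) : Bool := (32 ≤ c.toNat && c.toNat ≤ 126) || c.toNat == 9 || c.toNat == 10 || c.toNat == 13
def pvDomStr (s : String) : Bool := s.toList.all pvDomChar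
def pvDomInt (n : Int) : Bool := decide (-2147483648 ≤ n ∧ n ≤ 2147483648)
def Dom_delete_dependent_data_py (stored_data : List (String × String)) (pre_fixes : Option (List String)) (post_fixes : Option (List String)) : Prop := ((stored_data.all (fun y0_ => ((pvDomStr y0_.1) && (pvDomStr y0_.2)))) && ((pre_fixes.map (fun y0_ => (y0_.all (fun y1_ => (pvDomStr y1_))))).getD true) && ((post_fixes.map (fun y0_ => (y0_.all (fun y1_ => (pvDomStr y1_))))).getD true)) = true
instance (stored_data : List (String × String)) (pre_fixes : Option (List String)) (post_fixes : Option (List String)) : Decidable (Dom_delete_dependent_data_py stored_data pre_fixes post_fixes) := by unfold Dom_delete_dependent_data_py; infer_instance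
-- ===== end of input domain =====

-- B inverts the loop nesting (fix-major collection of a doomed-key set, then one rebuild pass);
-- equivalence of the RETURN value is proved on all inputs (A is total).

-- ===== PORT A =====
-- Literal port of A: start from stored_data; if pre_fixes is truthy, filter out keys
-- starting with any prefix; if post_fixes is truthy, filter out keys ending with any suffix.
def delete_dependent_data_py (stored_data : List (String × String)) (pre_fixes : Option (List String)) (post_fixes : Option (List String)) : List (String × String) :=
  let filtered_data := stored_data
  let filtered_data :=
    match pre_fixes with
    | none => filtered_data
    | some pres =>
      if pres.isEmpty then filtered_data
      else filtered_data.filter (fun elem =>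
        !((pres.map (fun data_field_prefix => PySem.Str.startswith elem.1 data_field_prefix)).any id))
  let filtered_data :=
    match post_fixes with
    | none => filtered_data
    | some posts =>
      if posts.isEmpty then filtered_data
      else filtered_data.filter (fun elem =>
        !((posts.map (fun data_field_postfix => PySem.Str.endswith elem.1 data_field_postfix)).any id))
  filtered_data

-- ===== PORT B =====
-- One fix-major collection loop: for each fix, scan the keys and add the matching ones to `doomed`.
def pvCollect (keys : List String) (fixes : List String) (mtch : String → String → Bool)
    (doomed : PySem.Set String) : PySem.Set String :=
  fixes.foldl (fun d fx =>
    keys.foldl (fun d key => if mtch key fx then PySem.Set.add d key else d) d) doomed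

def delete_dependent_data_py_alt (stored_data : List (String × String)) (pre_fixes : Option (List String)) (post_fixes : Option (List String)) : List (String × String) :=
  let keys := stored_data.map Prod.fst
  let doomed := pvCollect keys (pre_fixes.getD []) (fun k p => PySem.Str.startswith k p) PySem.Set.empty
  let doomed := pvCollect keys (post_fixes.getD []) (fun k s => PySem.Str.endswith k s) doomed
  stored_data.filter (fun kv => !(PySem.Set.contains doomed kv.1))

-- ===== PRECONDITION & SPEC =====
def Spec_delete_dependent_data_py (stored_data : List (String × String)) (pre_fixes : Option (List String)) (post_fixes : Option (List String)) (out : List (String × String)) : Prop := out = delete_dependent_data_py_alt stored_data pre_fixes post_fixes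
instance (stored_data : List (String × String)) (pre_fixes : Option (List String)) (post_fixes : Option (List String)) (out : List (String × String)) : Decidable (Spec_delete_dependent_data_py stored_data pre_fixes post_fixes out) := by unfold Spec_delete_dependent_data_py; infer_instance

-- ===== CLAIM =====
def Claim_equal_delete_dependent_data_py : Prop := ∀ (stored_data : List (String × String)) (pre_fixes : Option (List String)) (post_fixes : Option (List String)), Dom_delete_dependent_data_py stored_data pre_fixes post_fixes → Spec_delete_dependent_data_py stored_data pre_fixes post_fixes (delete_dependent_data_py stored_data pre_fixes post_fixes)

-- ===== LEMMAS AND PROOFS =====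

theorem pv_mem_inner (keys : List String) (m : String → Bool) (d : PySem.Set String) (y : String) :
    y ∈ keys.foldl (fun d key => if m key then PySem.Set.add d key else d) d ↔
      y ∈ d ∨ (y ∈ keys ∧ m y = true) := by
  induction keys generalizing d with
  | nil => simp
  | cons k ks ih =>
    simp only [List.foldl_cons, ih, List.mem_cons]
    by_cases hk : m k = true
    · simp only [if_pos hk, PySem.Set.mem_add]
      constructor
      · rintro ((h | rfl) | h)
        · exact Or.inl h
        · exact Or.inr ⟨Or.inl rfl, hk⟩
        · exact Or.inr ⟨Or.inr h.1, h.2⟩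
      · rintro (h | ⟨rfl | h, hm⟩)
        · exact Or.inl (Or.inl h)
        · exact Or.inl (Or.inr rfl)
        · exact Or.inr ⟨h, hm⟩
    · simp only [if_neg hk]
      constructor
      · rintro (h | h)
        · exact Or.inl h
        · exact Or.inr ⟨Or.inr h.1, h.2⟩
      · rintro (h | ⟨rfl | h, hm⟩)
        · exact Or.inl h
        · exact absurd hm hk
        · exact Or.inr ⟨h, hm⟩

theorem pv_mem_collect (keys fixes : List String) (mtch : String → String → Bool)
    (d : PySem.Set String) (y : String) :
    y ∈ pvCollect keys fixes mtch d ↔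
      y ∈ d ∨ (y ∈ keys ∧ ∃ f ∈ fixes, mtch y f = true) := by
  induction fixes generalizing d with
  | nil => simp [pvCollect]
  | cons f fs ih =>
    simp only [pvCollect, List.foldl_cons] at *
    rw [ih, pv_mem_inner]
    constructor
    · rintro ((h | h) | ⟨hk, g, hg, hm⟩)
      · exact Or.inl h
      · exact Or.inr ⟨h.1, f, List.mem_cons_self .., h.2⟩
      · exact Or.inr ⟨hk, g, List.mem_cons_of_mem _ hg, hm⟩
    · rintro (h | ⟨hk, g, hg, hm⟩)
      · exact Or.inl (Or.inl h)
      · rcases List.mem_cons.1 hg with rfl | hg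
        · exact Or.inl (Or.inr ⟨hk, hm⟩)
        · exact Or.inr ⟨hk, g, hg, hm⟩

-- contains on the doomed set equals "mtch some prefix or some suffix", for keys of stored_data
theorem pv_contains_doomed (sd : List (String × String)) (pres posts : List String)
    (k : String) (hk : k ∈ sd.map Prod.fst) :
    PySem.Set.contains
        (pvCollect (sd.map Prod.fst) posts (fun k s => PySem.Str.endswith k s)
          (pvCollect (sd.map Prod.fst) pres (fun k p => PySem.Str.startswith k p) PySem.Set.empty)) k
      = (pres.any (fun p => PySem.Str.startswith k p) || posts.any (fun s => PySem.Str.endswith k s)) := by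
  rw [Bool.eq_iff_iff, PySem.Set.contains_iff, pv_mem_collect, pv_mem_collect]
  simp [PySem.Set.empty, hk, List.any_eq_true, or_comm]

theorem delete_dependent_data_py_spec' (sd : List (String × String))
    (pre post : Option (List String)) :
    delete_dependent_data_py sd pre post = delete_dependent_data_py_alt sd pre post := by
  unfold delete_dependent_data_py delete_dependent_data_py_alt
  simp only
  have hfilter : ∀ (pres posts : List String),
      sd.filter (fun kv => !(PySem.Set.contains
        (pvCollect (sd.map Prod.fst) posts (fun k s => PySem.Str.endswith k s)
          (pvCollect (sd.map Prod.fst) pres (fun k p => PySem.Str.startswith k p) PySem.Set.empty)) kv.1))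
      = sd.filter (fun kv => !(pres.any (fun p => PySem.Str.startswith kv.1 p)
                              || posts.any (fun s => PySem.Str.endswith kv.1 s))) := by
    intro pres posts
    apply List.filter_congr
    intro kv hkv
    rw [pv_contains_doomed sd pres posts kv.1 (List.mem_map_of_mem hkv)]
  cases pre with
  | none =>
    cases post with
    | none => rw [hfilter]; simp
    | some ss =>
      rw [hfilter]
      by_cases h : ss.isEmpty = true
      · simp [List.isEmpty_iff.1 h]
      · simp [h, List.any_map]
  | some ps =>
    cases post with
    | none =>
      rw [hfilter]
      by_cases h : ps.isEmpty = true
      · simp [List.isEmpty_iff.1 h]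
      · simp [h, List.any_map]
    | some ss =>
      rw [hfilter]
      by_cases h1 : ps.isEmpty = true <;> by_cases h2 : ss.isEmpty = true
      · simp [List.isEmpty_iff.1 h1, List.isEmpty_iff.1 h2]
      · simp [List.isEmpty_iff.1 h1, h2, List.any_map]
      · simp [h1, List.isEmpty_iff.1 h2, List.any_map]
      · simp [h1, h2, List.any_map, List.filter_filter, Bool.and_comm]

-- ===== VERDICT =====
theorem delete_dependent_data_py_spec : Claim_equal_delete_dependent_data_py := by
  intro sd pre post _
  exact delete_dependent_data_py_spec' sd pre post
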